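-- pv_equiv track=rewrite | github.com/vinit-agr/rag-evaluation-system | src/rag_evaluation_system/chunkers/recursive_character.py | _split_by_separator_with_positions
-- ===== SOURCE A (Python) =====
-- def _split_by_separator_with_positions(
--     text: str, separator: str, offset: int
-- ) -> list[tuple[str, int, int]]:
--     """Split text by separator while tracking positions.
--
--     Args:
--         text: The text to split.
--         separator: The separator to split on.
--         offset: Starting offset for positions.
--
--     Returns:
--         List of tuples (split_text, start_position, end_position).
--     """
--     if separator == "":
--         # Character-level split
--         return [(char, offset + i, offset + i + 1) for i, char in enumerate(text)]
--
--     result: list[tuple[str, int, int]] = []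
--     current_pos = 0
--
--     parts = text.split(separator)
--     for i, part in enumerate(parts):
--         if i < len(parts) - 1:
--             # Non-final part: include separator
--             chunk = part + separator
--             start = offset + current_pos
--             end = start + len(chunk)
--             if chunk:  # Only include non-empty
--                 result.append((chunk, start, end))
--             current_pos += len(chunk)
--         elif part:
--             # Final part, only if non-empty
--             start = offset + current_pos
--             end = start + len(part)
--             result.append((part, start, end))
--
--     return result
-- ===== SOURCE B (Python) =====
-- def _split_by_separator_with_positions(text, separator, offset):
--     if separator == "":
--         return [(char, offset + i, offset + i + 1) for i, char in enumerate(text)]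
--     result = []
--     pos = 0
--     rest = text
--     while True:
--         hit = rest.find(separator)
--         if hit == -1:
--             break
--         cut = hit + len(separator)
--         result.append((rest[:cut], offset + pos, offset + pos + cut))
--         pos += cut
--         rest = rest[cut:]
--     if rest:
--         result.append((rest, offset + pos, offset + pos + len(rest)))
--     return result
-- ===== Notes on version B (the rewrite author's own statement) =====
-- stated objective: alternative
-- what changed: B replaces A's split()-then-reconstruct pass over the parts list with a cursor scan that repeatedly find()s the next separator occurrence in the remaining text and emits each chunk directly with its positions.
import Mathlib
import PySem

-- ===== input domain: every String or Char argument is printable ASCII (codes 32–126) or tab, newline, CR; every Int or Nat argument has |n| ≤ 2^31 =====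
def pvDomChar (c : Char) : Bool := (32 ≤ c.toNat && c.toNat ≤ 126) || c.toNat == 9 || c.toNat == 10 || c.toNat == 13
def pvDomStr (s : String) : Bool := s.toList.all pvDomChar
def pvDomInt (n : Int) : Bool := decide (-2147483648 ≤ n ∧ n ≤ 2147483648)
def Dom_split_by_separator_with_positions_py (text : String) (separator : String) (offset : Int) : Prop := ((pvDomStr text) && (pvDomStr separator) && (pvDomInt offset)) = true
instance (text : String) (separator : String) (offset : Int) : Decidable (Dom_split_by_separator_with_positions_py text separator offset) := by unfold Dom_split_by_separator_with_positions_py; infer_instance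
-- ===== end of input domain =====

-- B replaces A's split-then-reconstruct pass with a cursor scan (find the next separator
-- occurrence, emit the chunk, advance past it); objective: alternative decomposition, same cost.

-- ===== PORT A =====
-- A: split on the separator, then walk the parts re-attaching the separator and summing lengths.
def split_by_separator_with_positions_py (text : String) (separator : String) (offset : Int) : List (String × Int × Int) :=
  if separator = "" then
    (PySem.List.enumerate text.toList 0).map (fun ic => (String.ofList [ic.2], offset + ic.1, offset + ic.1 + 1))
  else
    let parts := PySem.Chars.splitOn text.toList separator.toList
    ((PySem.List.enumerate parts 0).foldl (fun (st : List (String × Int × Int) × Int) ip =>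
      if ip.1 < (parts.length : Int) - 1 then
        let chunk := ip.2 ++ separator.toList
        let start := offset + st.2
        let fin := start + (chunk.length : Int)
        (if chunk ≠ [] then st.1 ++ [(String.ofList chunk, start, fin)] else st.1,
         st.2 + (chunk.length : Int))
      else if ip.2 ≠ [] then
        let start := offset + st.2
        (st.1 ++ [(String.ofList ip.2, start, start + (ip.2.length : Int))], st.2)
      else st) ([], 0)).1

-- ===== PORT B =====
-- B's loop: find the next occurrence of sep in the remaining text, emit through it, recurse on the tail.
def pvSplitB_go (offset : Int) (sep : List Char) (hsep : sep ≠ []) (pos : Int) (rest : List Char) : List (String × Int × Int) :=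
  let hit := PySem.Chars.find rest sep
  if hit = -1 then
    if rest = [] then []
    else [(String.ofList rest, offset + pos, offset + pos + (rest.length : Int))]
  else
    let cut := hit.toNat + sep.length
    (String.ofList (rest.take cut), offset + pos, offset + pos + (cut : Int)) ::
      pvSplitB_go offset sep hsep (pos + (cut : Int)) (rest.drop cut)
termination_by rest.length
decreasing_by
  rename_i h
  have hinf : sep <:+: rest := (PySem.Chars.find_ne_neg_one_iff rest sep).mp h
  have hrest : rest ≠ [] := by
    intro hr; subst hr
    exact hsep (List.eq_nil_of_infix_nil hinf)
  have h1 : 1 ≤ sep.length := List.length_pos_iff.mpr hsep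
  have h2 : 1 ≤ rest.length := List.length_pos_iff.mpr hrest
  simp only [List.length_drop]
  omega

def split_by_separator_with_positions_py_alt (text : String) (separator : String) (offset : Int) : List (String × Int × Int) :=
  if h : separator = "" then
    (PySem.List.enumerate text.toList 0).map (fun ic => (String.ofList [ic.2], offset + ic.1, offset + ic.1 + 1))
  else
    pvSplitB_go offset separator.toList
      (fun hl => h (by simpa [String.toList_eq_nil_iff] using congrArg String.ofList hl)) 0 text.toList

-- ===== PRECONDITION & SPEC =====
def Spec_split_by_separator_with_positions_py (text : String) (separator : String) (offset : Int) (out : List (String × Int × Int)) : Prop := out = split_by_separator_with_positions_py_alt text separator offset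
instance (text : String) (separator : String) (offset : Int) (out : List (String × Int × Int)) : Decidable (Spec_split_by_separator_with_positions_py text separator offset out) := by unfold Spec_split_by_separator_with_positions_py; infer_instance

-- ===== CLAIM (what is proved, stated in full; the proofs are below) =====
def Claim_equal_split_by_separator_with_positions_py : Prop := ∀ (text : String) (separator : String) (offset : Int), Dom_split_by_separator_with_positions_py text separator offset → Spec_split_by_separator_with_positions_py text separator offset (split_by_separator_with_positions_py text separator offset)

-- ===== LEMMAS AND PROOFS =====

-- the common "list of chunks with positions" both sides compute, defined structurally on the parts
def pvSpecL (offset : Int) (sep : List Char) : Int → List (List Char) → List (String × Int × Int)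
  | _, [] => []
  | cur, [p] =>
      if p ≠ [] then [(String.ofList p, offset + cur, offset + cur + (p.length : Int))] else []
  | cur, p :: ps =>
      (String.ofList (p ++ sep), offset + cur, offset + cur + ((p.length + sep.length : Nat) : Int)) ::
        pvSpecL offset sep (cur + ((p.length + sep.length : Nat) : Int)) ps

lemma pv_modifyHead_modifyHead {α : Type} (f g : α → α) (xs : List α) :
    (xs.modifyHead g).modifyHead f = xs.modifyHead (fun x => f (g x)) := by
  cases xs <;> simp

lemma pv_modifyHead_idf (xs : List (List Char)) :
    xs.modifyHead (fun x => x) = xs := by cases xs <;> simp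

lemma pv_go_nil (sep cur : List Char) (acc : List (List Char)) (fuel : Nat) (hf : 0 < fuel) :
    PySem.Chars.splitOn.go sep fuel [] cur acc
      = acc.reverse ++ (PySem.Chars.splitOn [] sep).modifyHead (cur.reverse ++ ·) := by
  obtain ⟨f, rfl⟩ : ∃ f, fuel = f + 1 := ⟨fuel - 1, by omega⟩
  have h0 : PySem.Chars.splitOn [] sep = [[]] := by
    unfold PySem.Chars.splitOn
    rw [PySem.Chars.splitOn.go.eq_def]
    simp
  rw [PySem.Chars.splitOn.go.eq_def, h0]
  simp

-- master lemma: splitOn.go with enough fuel, any cur/acc, in terms of splitOn itself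
lemma pv_go_spec (sep : List Char) (hsep : sep ≠ []) :
    ∀ n (l : List Char), l.length ≤ n → ∀ fuel cur acc, l.length < fuel →
      PySem.Chars.splitOn.go sep fuel l cur acc
        = acc.reverse ++ (PySem.Chars.splitOn l sep).modifyHead (cur.reverse ++ ·) := by
  have hs1 : 1 ≤ sep.length := List.length_pos_iff.mpr hsep
  intro n
  induction n with
  | zero =>
    intro l hl fuel cur acc hf
    have hln : l = [] := List.eq_nil_of_length_eq_zero (Nat.le_zero.mp hl)
    subst hln
    exact pv_go_nil sep cur acc fuel (by omega)
  | succ n ih =>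
    intro l hl fuel cur acc hf
    cases l with
    | nil => exact pv_go_nil sep cur acc fuel (by omega)
    | cons c rest =>
      obtain ⟨f, rfl⟩ : ∃ f, fuel = f + 1 := ⟨fuel - 1, by omega⟩
      have hlen : (c :: rest).length = rest.length + 1 := by simp
      by_cases hp : sep.isPrefixOf (c :: rest) = true
      · have step : ∀ (cur' : List Char) (acc' : List (List Char)) (g : Nat),
            PySem.Chars.splitOn.go sep (g+1) (c :: rest) cur' acc'
              = PySem.Chars.splitOn.go sep g (List.drop sep.length (c :: rest)) [] (cur'.reverse :: acc') := by
          intro cur' acc' g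
          rw [PySem.Chars.splitOn.go.eq_def]; simp [hp]
        have hdl : (List.drop sep.length (c :: rest)).length ≤ n := by
          simp only [List.length_drop]; simp at hl; omega
        have hfu : (List.drop sep.length (c :: rest)).length < f := by
          simp only [List.length_drop]; simp at hf; omega
        have hfu' : (List.drop sep.length (c :: rest)).length < rest.length + 1 := by
          simp only [List.length_drop]; omega
        have hsplit : PySem.Chars.splitOn (c :: rest) sep
            = [] :: PySem.Chars.splitOn (List.drop sep.length (c :: rest)) sep := by
          conv_lhs => unfold PySem.Chars.splitOn
          rw [hlen, step, ih _ hdl _ _ _ hfu']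
          simp [pv_modifyHead_idf]
        rw [step, ih _ hdl _ _ _ hfu, hsplit]
        simp [pv_modifyHead_idf]
      · have step : ∀ (cur' : List Char) (acc' : List (List Char)) (g : Nat),
            PySem.Chars.splitOn.go sep (g+1) (c :: rest) cur' acc'
              = PySem.Chars.splitOn.go sep g rest (c :: cur') acc' := by
          intro cur' acc' g
          rw [PySem.Chars.splitOn.go.eq_def]; simp [hp]
        have hdl : rest.length ≤ n := by simp at hl; omega
        have hfu : rest.length < f := by simp at hf; omega
        have hfu' : rest.length < rest.length + 1 := by omega
        have hsplit : PySem.Chars.splitOn (c :: rest) sep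
            = (PySem.Chars.splitOn rest sep).modifyHead (fun x => c :: x) := by
          conv_lhs => unfold PySem.Chars.splitOn
          rw [hlen, step, ih _ hdl _ _ _ hfu']
          simp
        rw [step, ih _ hdl _ _ _ hfu, hsplit, pv_modifyHead_modifyHead]
        simp

-- splitOn with no occurrence of sep
lemma pv_splitOn_not_infix (sep : List Char) (hsep : sep ≠ []) (l : List Char)
    (h : ¬ sep <:+: l) : PySem.Chars.splitOn l sep = [l] := by
  induction l with
  | nil =>
    unfold PySem.Chars.splitOn
    rw [PySem.Chars.splitOn.go.eq_def]
    simp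
  | cons c rest ih =>
    have hp : ¬ sep.isPrefixOf (c :: rest) = true := by
      intro hpf
      exact h (List.IsPrefix.isInfix (List.isPrefixOf_iff_prefix.mp hpf))
    have hrest : ¬ sep <:+: rest := fun hi => h (hi.trans (List.tail_suffix (c :: rest)).isInfix)
    have step : PySem.Chars.splitOn (c :: rest) sep
        = (PySem.Chars.splitOn rest sep).modifyHead (fun x => c :: x) := by
      conv_lhs => unfold PySem.Chars.splitOn
      rw [PySem.Chars.splitOn.go.eq_def]
      simp only [hp, List.length_cons]
      rw [pv_go_spec sep hsep rest.length rest (le_refl _) _ _ _ (by omega)]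
      simp
    rw [step, ih hrest]
    simp

lemma pv_splitOn_cons_prefix (sep : List Char) (hsep : sep ≠ []) (c : Char) (rest : List Char)
    (hp : sep.isPrefixOf (c :: rest) = true) :
    PySem.Chars.splitOn (c :: rest) sep
      = [] :: PySem.Chars.splitOn (List.drop sep.length (c :: rest)) sep := by
  have hs1 : 1 ≤ sep.length := List.length_pos_iff.mpr hsep
  conv_lhs => unfold PySem.Chars.splitOn
  rw [PySem.Chars.splitOn.go.eq_def]
  simp only [hp, List.length_cons]
  rw [pv_go_spec sep hsep (List.drop sep.length (c :: rest)).length _ (le_refl _) _ _ _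
    (by simp only [List.length_drop, List.length_cons]; omega)]
  simp [pv_modifyHead_idf]

lemma pv_splitOn_cons_not_prefix (sep : List Char) (hsep : sep ≠ []) (c : Char) (rest : List Char)
    (hp : ¬ sep.isPrefixOf (c :: rest) = true) :
    PySem.Chars.splitOn (c :: rest) sep
      = (PySem.Chars.splitOn rest sep).modifyHead (fun x => c :: x) := by
  conv_lhs => unfold PySem.Chars.splitOn
  rw [PySem.Chars.splitOn.go.eq_def]
  simp only [hp, List.length_cons]
  rw [pv_go_spec sep hsep rest.length rest (le_refl _) _ _ _ (by omega)]
  simp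

lemma pv_find_prefix (sep l : List Char) (h : sep <+: l) : PySem.Chars.find l sep = 0 := by
  have hnn : 0 ≤ PySem.Chars.find l sep := (PySem.Chars.find_nonneg_iff l sep).mpr h.isInfix
  have hspec := PySem.Chars.find_spec hnn
  by_contra hne
  have hpos : 0 < (PySem.Chars.find l sep).toNat := by omega
  exact hspec.2 0 hpos (by simpa using h)

lemma pv_infix_of_cons (sep : List Char) (c : Char) (rest : List Char)
    (hnp : ¬ sep <+: (c :: rest)) (hinf : sep <:+: (c :: rest)) : sep <:+: rest := by
  obtain ⟨j, hj⟩ := (PySem.Chars.exists_prefix_drop_iff_isIn sep (c :: rest)).mpr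
    ((PySem.Chars.isIn_iff_infix sep (c :: rest)).mpr hinf)
  rcases j with _ | j
  · exact absurd (by simpa using hj) hnp
  · exact ((PySem.Chars.exists_prefix_drop_iff_isIn sep rest).mp ⟨j, by simpa using hj⟩)
      |> (PySem.Chars.isIn_iff_infix sep rest).mp

lemma pv_find_cons (sep : List Char) (c : Char) (rest : List Char)
    (hnp : ¬ sep <+: (c :: rest)) (hinf : sep <:+: (c :: rest)) :
    (PySem.Chars.find (c :: rest) sep).toNat = (PySem.Chars.find rest sep).toNat + 1 := by
  have hrest : sep <:+: rest := pv_infix_of_cons sep c rest hnp hinf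
  have hnnl : 0 ≤ PySem.Chars.find (c :: rest) sep := (PySem.Chars.find_nonneg_iff _ _).mpr hinf
  have hnnr : 0 ≤ PySem.Chars.find rest sep := (PySem.Chars.find_nonneg_iff _ _).mpr hrest
  have hl := PySem.Chars.find_spec hnnl
  have hr := PySem.Chars.find_spec hnnr
  set K := (PySem.Chars.find (c :: rest) sep).toNat with hK
  set k' := (PySem.Chars.find rest sep).toNat with hk'
  have hKpos : 0 < K := by
    by_contra h0
    exact hnp (by simpa [show K = 0 by omega] using hl.1)
  have hd : List.drop K (c :: rest) = List.drop (K - 1) rest := by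
    rcases Nat.exists_eq_add_of_lt hKpos with ⟨m, hm⟩
    simp [show K = m + 1 by omega]
  have h1 : ¬ K - 1 < k' := fun hlt => hr.2 (K - 1) hlt (hd ▸ hl.1)
  have h2 : ¬ k' + 1 < K := fun hlt => hl.2 (k' + 1) hlt (by simpa using hr.1)
  omega

-- splitOn with an occurrence: first part is up to the first occurrence
lemma pv_splitOn_infix (sep : List Char) (hsep : sep ≠ []) (l : List Char)
    (h : sep <:+: l) :
    PySem.Chars.splitOn l sep
      = l.take (PySem.Chars.find l sep).toNat ::
        PySem.Chars.splitOn (l.drop ((PySem.Chars.find l sep).toNat + sep.length)) sep := by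
  induction l with
  | nil => exact absurd (List.eq_nil_of_infix_nil h) hsep
  | cons c rest ih =>
    by_cases hpfx : sep <+: (c :: rest)
    · have hf0 : PySem.Chars.find (c :: rest) sep = 0 := pv_find_prefix sep _ hpfx
      rw [hf0]
      simpa using pv_splitOn_cons_prefix sep hsep c rest (List.isPrefixOf_iff_prefix.mpr hpfx)
    · have hrest : sep <:+: rest := pv_infix_of_cons sep c rest hpfx h
      have hKk : (PySem.Chars.find (c :: rest) sep).toNat
          = (PySem.Chars.find rest sep).toNat + 1 := pv_find_cons sep c rest hpfx h
      rw [pv_splitOn_cons_not_prefix sep hsep c rest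
          (fun hp => hpfx (List.isPrefixOf_iff_prefix.mp hp)), ih hrest, hKk]
      simp [List.take_succ_cons, Nat.add_right_comm]

lemma pv_splitOn_ne_nil (sep : List Char) (hsep : sep ≠ []) (l : List Char) :
    PySem.Chars.splitOn l sep ≠ [] := by
  by_cases h : sep <:+: l
  · rw [pv_splitOn_infix sep hsep l h]; simp
  · rw [pv_splitOn_not_infix sep hsep l h]; simp

lemma pv_take_prefix_drop (sep l : List Char) (k : Nat) (h : sep <+: l.drop k) :
    l.take (k + sep.length) = l.take k ++ sep := by
  obtain ⟨t, ht⟩ := h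
  rw [List.take_add, ← ht, List.take_left]

-- B's scan computes pvSpecL of splitOn
lemma pv_goB_spec (offset : Int) (sep : List Char) (hsep : sep ≠ []) :
    ∀ n (rest : List Char), rest.length ≤ n → ∀ pos,
      pvSplitB_go offset sep hsep pos rest
        = pvSpecL offset sep pos (PySem.Chars.splitOn rest sep) := by
  have hs1 : 1 ≤ sep.length := List.length_pos_iff.mpr hsep
  intro n
  induction n with
  | zero =>
    intro rest hl pos
    have hrn : rest = [] := List.eq_nil_of_length_eq_zero (Nat.le_zero.mp hl)
    subst hrn
    have hni : ¬ sep <:+: ([] : List Char) := fun hi => hsep (List.eq_nil_of_infix_nil hi)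
    have hf : PySem.Chars.find [] sep = -1 := (PySem.Chars.find_eq_neg_one_iff _ _).mpr hni
    rw [pvSplitB_go, pv_splitOn_not_infix sep hsep [] hni]
    simp [hf, pvSpecL]
  | succ n ih =>
    intro rest hl pos
    by_cases hf : PySem.Chars.find rest sep = -1
    · have hni : ¬ sep <:+: rest := (PySem.Chars.find_eq_neg_one_iff _ _).mp hf
      rw [pvSplitB_go, pv_splitOn_not_infix sep hsep rest hni]
      simp only [hf]
      by_cases hr : rest = [] <;> simp [hr, pvSpecL]
    · have hinf : sep <:+: rest := (PySem.Chars.find_ne_neg_one_iff _ _).mp hf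
      have hrne : rest ≠ [] := fun hr => hsep (List.eq_nil_of_infix_nil (hr ▸ hinf))
      have hnn : 0 ≤ PySem.Chars.find rest sep := (PySem.Chars.find_nonneg_iff _ _).mpr hinf
      set k := (PySem.Chars.find rest sep).toNat with hk
      have hpref : sep <+: rest.drop k := (PySem.Chars.find_spec hnn).1
      have hkle : k + sep.length ≤ rest.length := by
        have := hpref.length_le
        simp only [List.length_drop] at this
        have hkl : (PySem.Chars.find rest sep) ≤ (rest.length : Int) :=
          PySem.Chars.find_le_length rest sep
        omega
      have htake : rest.take (k + sep.length) = rest.take k ++ sep :=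
        pv_take_prefix_drop sep rest k hpref
      have hlen_take : (rest.take k).length = k := by
        rw [List.length_take]; omega
      have hdl : (rest.drop (k + sep.length)).length ≤ n := by
        simp only [List.length_drop]
        have : 1 ≤ rest.length := List.length_pos_iff.mpr hrne
        omega
      obtain ⟨q, qs, hq⟩ : ∃ q qs, PySem.Chars.splitOn (rest.drop (k + sep.length)) sep = q :: qs := by
        rcases hcs : PySem.Chars.splitOn (rest.drop (k + sep.length)) sep with _ | ⟨q, qs⟩
        · exact absurd hcs (pv_splitOn_ne_nil sep hsep _)
        · exact ⟨q, qs, rfl⟩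
      rw [pvSplitB_go, pv_splitOn_infix sep hsep rest hinf, ← hk, hq]
      simp only [hf, if_false, ih _ hdl, hq]
      simp [pvSpecL, htake, hlen_take]

-- A's fold computes pvSpecL of the parts
lemma pv_foldA_spec (offset : Int) (sep : List Char) (hsep : sep ≠ []) (L : Nat) :
    ∀ (parts : List (List Char)) (s : Int) res cur, parts ≠ [] → s + (parts.length : Int) = (L : Int) →
      ((PySem.List.enumerate parts s).foldl (fun (st : List (String × Int × Int) × Int) ip =>
        if ip.1 < (L : Int) - 1 then
          let chunk := ip.2 ++ sep
          let start := offset + st.2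
          let fin := start + (chunk.length : Int)
          (if chunk ≠ [] then st.1 ++ [(String.ofList chunk, start, fin)] else st.1,
           st.2 + (chunk.length : Int))
        else if ip.2 ≠ [] then
          let start := offset + st.2
          (st.1 ++ [(String.ofList ip.2, start, start + (ip.2.length : Int))], st.2)
        else st) (res, cur)).1
      = res ++ pvSpecL offset sep cur parts := by
  intro parts
  induction parts with
  | nil => intro s res cur hne; exact absurd rfl hne
  | cons p ps ih =>
    intro s res cur _ hs
    rw [PySem.List.enumerate_cons, List.foldl_cons]
    cases ps with
    | nil =>
      have hcond : ¬ (s < (L : Int) - 1) := by simp at hs; omega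
      simp only [hcond, if_false, PySem.List.enumerate_nil, List.foldl_nil]
      by_cases hp : p = [] <;> simp [hp, pvSpecL]
    | cons q qs =>
      have hcond : s < (L : Int) - 1 := by
        simp only [List.length_cons] at hs; push_cast at hs ⊢; omega
      have hchunk : p ++ sep ≠ [] := by simp [hsep]
      simp only [hcond, if_true, hchunk, ne_eq, not_false_eq_true]
      rw [ih (s + 1) _ _ (by simp) (by
        simp only [List.length_cons] at hs ⊢; push_cast at hs ⊢; omega)]
      simp [pvSpecL, List.length_append]

-- ===== VERDICT (by name: the statement is the Claim_ definition above) =====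
theorem split_by_separator_with_positions_py_spec : Claim_equal_split_by_separator_with_positions_py := by
  intro text separator offset _
  unfold Spec_split_by_separator_with_positions_py
  unfold split_by_separator_with_positions_py split_by_separator_with_positions_py_alt
  by_cases h : separator = ""
  · simp [h]
  · have hsep : separator.toList ≠ [] :=
      fun hl => h (by simpa [String.toList_eq_nil_iff] using congrArg String.ofList hl)
    simp only [if_neg h, dif_neg h]
    rw [pv_goB_spec offset separator.toList hsep text.toList.length text.toList (le_refl _) 0]
    rw [pv_foldA_spec offset separator.toList hsep
      (PySem.Chars.splitOn text.toList separator.toList).length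
      (PySem.Chars.splitOn text.toList separator.toList) 0 [] 0
      (pv_splitOn_ne_nil separator.toList hsep text.toList) (by simp)]
    simp
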